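-- pv_equiv track=rewrite | github.com/saluk/archonarcanabots | models/wiki_card_db.py | bifurcate_redemption
-- ===== SOURCE A (Python) =====
-- def bifurcate_redemption(card_datas):
--     """Returns (has_mixed_redemption, redemption, other)"""
--
--     houses = set([card["house"] for card in card_datas])
--     has_redemption = "Redemption" in houses
--     has_mixed_redemption = has_redemption and len(houses) > 1
--     redemp = []
--     other = []
--
--     for data in card_datas:
--         if data.get("house", None) == "Redemption" \
--            and has_mixed_redemption:
--             # The same card moving houses to Redemption
--             # in a different set becomes a different
--             # wiki page.
--             new_data = {}
--             new_data.update(data)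
--             new_data["card_title"] += " (Redemption)"
--             redemp.append(new_data)
--         else:
--             other.append(data)
--
--     return (has_mixed_redemption, redemp, other)
-- ===== SOURCE B (Python) =====
-- def bifurcate_redemption(card_datas):
--     """Returns (has_mixed_redemption, redemption, other)"""
--     redemption_cards = []
--     other_cards = []
--     for card in card_datas:
--         if card["house"] == "Redemption":
--             redemption_cards.append(card)
--         else:
--             other_cards.append(card)
--     has_mixed_redemption = bool(redemption_cards) and bool(other_cards)
--     if not has_mixed_redemption:
--         return (False, [], list(card_datas))
--     redemp = []
--     for card in redemption_cards:
--         new_data = dict(card)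
--         new_data["card_title"] += " (Redemption)"
--         redemp.append(new_data)
--     return (has_mixed_redemption, redemp, other_cards)
-- ===== Notes on version B (the rewrite author's own statement) =====
-- stated objective: alternative
-- what changed: B derives has_mixed_redemption from the emptiness of a single partition into Redemption/other cards instead of building a set of all houses, and renames only in the mixed case after partitioning.
import Mathlib
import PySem

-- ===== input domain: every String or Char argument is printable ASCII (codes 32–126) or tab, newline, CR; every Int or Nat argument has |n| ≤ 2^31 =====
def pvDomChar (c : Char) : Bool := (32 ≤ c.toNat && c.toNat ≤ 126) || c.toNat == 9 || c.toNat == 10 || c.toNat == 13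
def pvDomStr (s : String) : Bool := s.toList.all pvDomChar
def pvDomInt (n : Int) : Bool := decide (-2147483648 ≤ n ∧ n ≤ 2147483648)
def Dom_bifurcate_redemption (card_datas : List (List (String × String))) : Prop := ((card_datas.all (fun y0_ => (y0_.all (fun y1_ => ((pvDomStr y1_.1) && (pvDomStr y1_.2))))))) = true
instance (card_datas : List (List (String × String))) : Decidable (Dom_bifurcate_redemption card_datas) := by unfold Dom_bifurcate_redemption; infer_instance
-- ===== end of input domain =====

-- B changes the decomposition: has_mixed_redemption comes from the emptiness of a
-- Redemption/other partition instead of a set of all houses; same return value.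
-- ===== PORT A =====
-- shared sub-step (identical Python lines in A and B): new_data = dict copy of data,
-- then new_data["card_title"] += " (Redemption)"; the ["card_title"] read is ported as
-- getD "" (exact under Pre_, which guarantees the key; Python raises KeyError otherwise)
def pvRenameRedemption (data : List (String × String)) : List (String × String) :=
  let nd := PySem.Dict.update PySem.Dict.empty data
  (PySem.Dict.insert nd "card_title"
    (((PySem.Dict.get? nd "card_title").getD "") ++ " (Redemption)")).items

-- card["house"] in the set comprehension is ported as getD "" (exact under Pre_, which
-- guarantees the key; Python raises KeyError otherwise)
def bifurcate_redemption (card_datas : List (List (String × String))) : Bool × (List (List (String × String))) × (List (List (String × String))) :=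
  let houses : PySem.Set String :=
    PySem.Set.ofList (card_datas.map (fun card => (PySem.Dict.get? (PySem.Dict.mk card) "house").getD ""))
  let has_redemption := PySem.Set.contains houses "Redemption"
  let has_mixed_redemption := has_redemption && decide (1 < houses.length)
  let ro := card_datas.foldl (fun (acc : List (List (String × String)) × List (List (String × String))) data =>
      if (PySem.Dict.get? (PySem.Dict.mk data) "house" == some "Redemption") && has_mixed_redemption then
        (acc.1 ++ [pvRenameRedemption data], acc.2)
      else
        (acc.1, acc.2 ++ [data])) ([], [])
  (has_mixed_redemption, ro.1, ro.2)

-- ===== PORT B =====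
-- card["house"] is ported as getD "" (exact under Pre_; Python raises KeyError otherwise)
def bifurcate_redemption_alt (card_datas : List (List (String × String))) : Bool × (List (List (String × String))) × (List (List (String × String))) :=
  let parts := card_datas.partition
    (fun card => (PySem.Dict.get? (PySem.Dict.mk card) "house").getD "" == "Redemption")
  if parts.1.isEmpty || parts.2.isEmpty then
    (false, [], card_datas)
  else
    (true, parts.1.map pvRenameRedemption, parts.2)

-- ===== PRECONDITION & SPEC =====
-- Pre_ excludes exactly the inputs where Python A raises KeyError: a card without a
-- "house" key, or (in the mixed case) a Redemption card without a "card_title" key.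
def Pre_bifurcate_redemption (card_datas : List (List (String × String))) : Prop :=
  (∀ card ∈ card_datas, (PySem.Dict.get? (PySem.Dict.mk card) "house").isSome = true) ∧
  (((∃ card ∈ card_datas, PySem.Dict.get? (PySem.Dict.mk card) "house" = some "Redemption") ∧
    (∃ card ∈ card_datas, PySem.Dict.get? (PySem.Dict.mk card) "house" ≠ some "Redemption")) →
   ∀ card ∈ card_datas, PySem.Dict.get? (PySem.Dict.mk card) "house" = some "Redemption" →
     (PySem.Dict.get? (PySem.Dict.mk card) "card_title").isSome = true)
instance (card_datas : List (List (String × String))) : Decidable (Pre_bifurcate_redemption card_datas) := by unfold Pre_bifurcate_redemption; infer_instance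
def pvWitness_bifurcate_redemption : (List (List (String × String))) :=
  [[("house", "Redemption"), ("card_title", "Chota Hazri")], [("house", "Dis"), ("card_title", "Pit Demon")]]
def Spec_bifurcate_redemption (card_datas : List (List (String × String))) (out : Bool × (List (List (String × String))) × (List (List (String × String)))) : Prop := out = bifurcate_redemption_alt card_datas
instance (card_datas : List (List (String × String))) (out : Bool × (List (List (String × String))) × (List (List (String × String)))) : Decidable (Spec_bifurcate_redemption card_datas out) := by unfold Spec_bifurcate_redemption; infer_instance

-- ===== CLAIM (what is proved, stated in full; the proofs are below) =====
def Claim_equal_bifurcate_redemption : Prop := ∀ (card_datas : List (List (String × String))), Dom_bifurcate_redemption card_datas → Pre_bifurcate_redemption card_datas → Spec_bifurcate_redemption card_datas (bifurcate_redemption card_datas)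

-- ===== LEMMAS AND PROOFS =====
-- the house of a card, and B's partition predicate
def pvHouse (card : List (String × String)) : String :=
  (PySem.Dict.get? (PySem.Dict.mk card) "house").getD ""
def pvIsRed (card : List (String × String)) : Bool := pvHouse card == "Redemption"

-- A's loop condition equals B's partition predicate (on every card, key present or not)
theorem pv_cond_eq (c : List (String × String)) :
    (PySem.Dict.get? (PySem.Dict.mk c) "house" == some "Redemption") = pvIsRed c := by
  unfold pvIsRed pvHouse
  cases hx : PySem.Dict.get? (PySem.Dict.mk c) "house" with
  | none => simp
  | some s => simp

-- characterisation of A's loop, for a fixed has_mixed flag b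
theorem pv_loop_char (b : Bool) (cds : List (List (String × String)))
    (r o : List (List (String × String))) :
    cds.foldl (fun (acc : List (List (String × String)) × List (List (String × String))) data =>
      if (PySem.Dict.get? (PySem.Dict.mk data) "house" == some "Redemption") && b then
        (acc.1 ++ [pvRenameRedemption data], acc.2)
      else
        (acc.1, acc.2 ++ [data])) (r, o)
    = (r ++ (if b then (cds.filter pvIsRed).map pvRenameRedemption else []),
       o ++ (if b then cds.filter (fun c => !pvIsRed c) else cds)) := by
  induction cds generalizing r o with
  | nil => simp
  | cons c t ih =>
    simp only [List.foldl_cons, pv_cond_eq c]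
    cases b with
    | false => simpa using ih r (o ++ [c])
    | true =>
      cases hc : pvIsRed c with
      | false => simpa [List.filter_cons, hc] using ih r (o ++ [c])
      | true => simpa [List.filter_cons, hc] using ih (r ++ [pvRenameRedemption c]) o

-- two distinct members force length > 1
theorem pv_one_lt_length {α : Type} {l : List α} {a b : α}
    (ha : a ∈ l) (hb : b ∈ l) (hne : a ≠ b) : 1 < l.length := by
  cases l with
  | nil => simp at ha
  | cons x t =>
    cases t with
    | nil =>
      simp at ha hb
      exact absurd (ha.trans hb.symm) hne
    | cons y u => simp only [List.length_cons]; omega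

-- a nodup list whose members all equal a has length ≤ 1
theorem pv_length_le_one {α : Type} {l : List α} {a : α}
    (hnd : l.Nodup) (hall : ∀ x ∈ l, x = a) : ¬ 1 < l.length := by
  cases l with
  | nil => simp
  | cons x t =>
    cases t with
    | nil => simp
    | cons y u =>
      exfalso
      have hx : x = a := hall x (by simp)
      have hy : y = a := hall y (by simp)
      have : x ≠ y := by
        simp [List.nodup_cons] at hnd
        exact fun h => hnd.1.1 h
      exact this (hx.trans hy.symm)

-- A's has_mixed flag equals B's partition-emptiness test
theorem pv_mixed_char (cds : List (List (String × String))) :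
    (PySem.Set.contains (PySem.Set.ofList (cds.map pvHouse)) "Redemption" &&
      decide (1 < (PySem.Set.ofList (cds.map pvHouse)).length))
    = (!(cds.filter pvIsRed).isEmpty && !(cds.filter (fun c => !pvIsRed c)).isEmpty) := by
  rw [Bool.eq_iff_iff]
  simp only [Bool.and_eq_true, decide_eq_true_eq, Bool.not_eq_true', List.isEmpty_eq_false_iff,
    Bool.not_eq_true, PySem.Set.contains_iff, PySem.Set.mem_ofList, List.mem_map,
    Ne, List.filter_eq_nil_iff, not_forall]
  constructor
  · rintro ⟨⟨c, hc, hhc⟩, hlen⟩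
    refine ⟨⟨c, hc, by simp [pvIsRed, hhc]⟩, ?_⟩
    by_contra hno
    push Not at hno
    have hall : ∀ x ∈ (PySem.Set.ofList (cds.map pvHouse) : List String), x = "Redemption" := by
      intro x hx
      rw [PySem.Set.mem_ofList, List.mem_map] at hx
      obtain ⟨d, hd, hdx⟩ := hx
      have := hno d hd
      simp [pvIsRed] at this
      rw [← hdx]; exact this
    exact pv_length_le_one (PySem.Set.nodup_ofList _) hall hlen
  · rintro ⟨⟨c, hc, hrc⟩, ⟨d, hd, hdc⟩⟩
    simp [pvIsRed] at hrc hdc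
    refine ⟨⟨c, hc, hrc⟩, ?_⟩
    have h1 : "Redemption" ∈ (PySem.Set.ofList (cds.map pvHouse) : List String) := by
      rw [PySem.Set.mem_ofList, List.mem_map]; exact ⟨c, hc, hrc⟩
    have h2 : pvHouse d ∈ (PySem.Set.ofList (cds.map pvHouse) : List String) := by
      rw [PySem.Set.mem_ofList, List.mem_map]; exact ⟨d, hd, rfl⟩
    exact pv_one_lt_length h1 h2 (fun h => hdc h.symm)

theorem pv_ports_eq (cds : List (List (String × String))) :
    bifurcate_redemption cds = bifurcate_redemption_alt cds := by
  unfold bifurcate_redemption bifurcate_redemption_alt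
  rw [List.partition_eq_filter_filter]
  rw [show (fun card => (PySem.Dict.get? (PySem.Dict.mk card) "house").getD "" == "Redemption") = pvIsRed from rfl,
      show (fun card => (PySem.Dict.get? (PySem.Dict.mk card) "house").getD "") = pvHouse from rfl,
      show (not ∘ pvIsRed) = (fun c => !pvIsRed c) from rfl]
  simp only [pv_mixed_char, pv_loop_char]
  cases h1 : (cds.filter pvIsRed).isEmpty with
  | true =>
    simp
  | false =>
    cases h2 : (cds.filter (fun c => !pvIsRed c)).isEmpty with
    | true =>
      simp
    | false =>
      simp

-- ===== VERDICT (by name: the statement is the Claim_ definition above) =====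
theorem bifurcate_redemption_spec : Claim_equal_bifurcate_redemption := by
  intro cds _ _
  unfold Spec_bifurcate_redemption
  exact pv_ports_eq cds
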